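-- pv_equiv track=rewrite | github.com/tahbee03/CSC113-Midterm | Full_program_numpy.py | listToAddress
-- ===== SOURCE A (Python) =====
-- def listToAddress(a, rangeA):
--     N = len(rangeA)
--     sumtotal = 0
--     for i in range(0, N):
--         if a[i] < rangeA[i] and a[i] >= 0:
--             multitotal = a[i]
--             for j in range(i + 1, N):
--                 multitotal *= rangeA[j]
--             sumtotal += multitotal
--         else:
--             sumtotal = -1
--             break
--     return sumtotal
-- ===== SOURCE B (Python) =====
-- def listToAddress(a, rangeA):
--     if any(not (0 <= d < r) for d, r in zip(a, rangeA)):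
--         return -1
--     total, mult = 0, 1
--     for d, r in zip(reversed(a[:len(rangeA)]), reversed(rangeA)):
--         total += d * mult
--         mult *= r
--     return total
-- ===== Notes on version B (the rewrite author's own statement) =====
-- stated objective: faster
-- what changed: A recomputes the suffix product of the bases from scratch for every digit (nested loop, breaking with -1 at the first out-of-range digit); B validates all digit/base pairs once, then accumulates the address in a single backward pass keeping a running multiplier.
-- outside the precondition, e.g. on listToAddress([0, 0], [2, 3, 4]): A raises IndexError, B returns 0
import Mathlib
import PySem

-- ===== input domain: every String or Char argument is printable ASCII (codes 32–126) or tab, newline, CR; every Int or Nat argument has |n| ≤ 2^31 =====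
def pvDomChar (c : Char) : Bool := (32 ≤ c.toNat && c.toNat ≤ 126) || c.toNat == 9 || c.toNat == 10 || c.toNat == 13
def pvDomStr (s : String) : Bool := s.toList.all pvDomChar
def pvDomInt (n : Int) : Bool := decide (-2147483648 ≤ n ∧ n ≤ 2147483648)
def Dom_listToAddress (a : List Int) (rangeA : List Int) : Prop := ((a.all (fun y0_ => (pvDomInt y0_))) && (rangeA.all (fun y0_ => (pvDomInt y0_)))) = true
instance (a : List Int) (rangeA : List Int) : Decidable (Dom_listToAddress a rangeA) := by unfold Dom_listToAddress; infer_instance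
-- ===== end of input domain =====

-- B replaces A's O(N^2) nested suffix-product loops with one backward pass keeping a running
-- multiplier (O(N)); validity of all digits is checked first, so the early 'break' of A is a plain early return.

-- B: one backward pass with a running multiplier instead of A's per-digit suffix-product inner loop (O(N) vs O(N^2)); validity checked up front replaces A's break.

-- ===== PORT A =====
-- inner loop 'for j in range(i + 1, N): multitotal *= rangeA[j]' of A, as a fold over range
def listToAddressInnerA (rangeA : List Int) (N i : Nat) (multitotal : Int) : Int :=
  (PySem.List.pyRange (i + 1) N 1).foldl (fun m j => m * rangeA.getD j.toNat 0) multitotal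

-- outer 'for i in range(0, N)' with its break and state sumtotal
def listToAddressLoopA (a rangeA : List Int) (N : Nat) (i : Nat) (sumtotal : Int) : Int :=
  if _h : i < N then
    if a.getD i 0 < rangeA.getD i 0 ∧ 0 ≤ a.getD i 0 then
      listToAddressLoopA a rangeA N (i + 1)
        (sumtotal + listToAddressInnerA rangeA N i (a.getD i 0))
    else -1
  else sumtotal
termination_by N - i

def listToAddress (a : List Int) (rangeA : List Int) : Int :=
  listToAddressLoopA a rangeA rangeA.length 0 0

-- ===== PORT B =====
def listToAddress_alt (a : List Int) (rangeA : List Int) : Int :=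
  if (List.zip a rangeA).any (fun p => !(decide (0 ≤ p.1) && decide (p.1 < p.2))) then -1
  else
    ((List.zip (PySem.List.slice a none (some (rangeA.length : Int))).reverse rangeA.reverse).foldl
      (fun (s : Int × Int) p => (s.1 + p.1 * s.2, s.2 * p.2)) (0, 1)).1

-- ===== PRECONDITION & SPEC =====
-- Pre_ excludes exactly the inputs where A raises IndexError: a shorter than rangeA while every
-- pair of present digit and base is in range, so the loop reads a[len(a)].
def Pre_listToAddress (a : List Int) (rangeA : List Int) : Prop :=
  rangeA.length ≤ a.length ∨ ∃ p ∈ List.zip a rangeA, ¬(0 ≤ p.1 ∧ p.1 < p.2)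
instance (a : List Int) (rangeA : List Int) : Decidable (Pre_listToAddress a rangeA) := by
  unfold Pre_listToAddress; infer_instance
def pvWitness_listToAddress : List Int × List Int := ([1, 0, 2], [2, 3, 4])

def Spec_listToAddress (a : List Int) (rangeA : List Int) (out : Int) : Prop := out = listToAddress_alt a rangeA
instance (a : List Int) (rangeA : List Int) (out : Int) : Decidable (Spec_listToAddress a rangeA out) := by unfold Spec_listToAddress; infer_instance

-- ===== CLAIM (what is proved, stated in full; the proofs are below) =====
def Claim_equal_listToAddress : Prop := ∀ (a : List Int) (rangeA : List Int), Dom_listToAddress a rangeA → Pre_listToAddress a rangeA → Spec_listToAddress a rangeA (listToAddress a rangeA)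

-- ===== LEMMAS AND PROOFS =====
-- right fold computed by B's backward pass: (weighted sum, running product of bases)
def pvAddr (z : List (Int × Int)) : Int × Int :=
  z.foldr (fun p s => (s.1 + p.1 * s.2, s.2 * p.2)) (0, 1)

theorem pvAddr_snd (xs ys : List Int) (h : ys.length ≤ xs.length) :
    (pvAddr (List.zip xs ys)).2 = ys.prod := by
  induction ys generalizing xs with
  | nil => simp [pvAddr]
  | cons y ys ih =>
    cases xs with
    | nil => simp at h
    | cons x xs =>
      simp only [List.zip_cons_cons, List.prod_cons, pvAddr, List.foldr_cons]
      rw [show ((List.zip xs ys).foldr (fun p s => (s.1 + p.1 * s.2, s.2 * p.2)) ((0:Int), (1:Int))) = pvAddr (List.zip xs ys) from rfl]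
      rw [ih xs (by simpa using h)]
      ring

theorem pvProd_pyRange (rangeA : List Int) (j : Nat) (c : Int) (h : j ≤ rangeA.length) :
    (PySem.List.pyRange (j : Int) (rangeA.length : Int) 1).foldl
      (fun m k => m * rangeA.getD k.toNat 0) c = c * (rangeA.drop j).prod := by
  induction hn : rangeA.length - j generalizing j c with
  | zero =>
    have hj : rangeA.length ≤ j := by omega
    rw [show PySem.List.pyRange (j : Int) (rangeA.length : Int) 1 = [] by
      simp [PySem.List.pyRange]; omega]
    simp [List.drop_eq_nil_of_le hj]
  | succ n ih =>
    have hj : j < rangeA.length := by omega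
    rw [PySem.List.pyRange_one_cons (by exact_mod_cast hj)]
    rw [show ((j:Int) + 1) = ((j+1 : Nat) : Int) by push_cast; ring]
    simp only [List.foldl_cons]
    rw [ih (j+1) _ (by omega) (by omega)]
    rw [List.drop_eq_getElem_cons hj, List.prod_cons]
    simp only [Int.toNat_natCast]
    rw [List.getD_eq_getElem rangeA 0 hj]
    ring

theorem innerA_eq (rangeA : List Int) (i : Nat) (c : Int) (h : i < rangeA.length) :
    listToAddressInnerA rangeA rangeA.length i c = c * (rangeA.drop (i + 1)).prod := by
  unfold listToAddressInnerA
  rw [show ((i:Int) + 1) = ((i+1 : Nat) : Int) by push_cast; ring]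
  exact pvProd_pyRange rangeA (i+1) c (by omega)

theorem loopA_valid (a rangeA : List Int) (i : Nat) (s : Int)
    (hN : rangeA.length ≤ a.length) (hi : i ≤ rangeA.length)
    (hv : ∀ k, i ≤ k → (hk : k < rangeA.length) → 0 ≤ a.getD k 0 ∧ a.getD k 0 < rangeA.getD k 0) :
    listToAddressLoopA a rangeA rangeA.length i s
      = s + (pvAddr (List.zip (a.drop i) (rangeA.drop i))).1 := by
  induction hn : rangeA.length - i generalizing i s with
  | zero =>
    have hie : i = rangeA.length := by omega
    subst hie
    rw [listToAddressLoopA]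
    simp [List.drop_eq_nil_of_le (le_refl rangeA.length), pvAddr]
  | succ n ih =>
    have hj : i < rangeA.length := by omega
    rw [listToAddressLoopA]
    rw [dif_pos hj, if_pos ⟨(hv i le_rfl hj).2, (hv i le_rfl hj).1⟩]
    rw [innerA_eq rangeA i _ hj]
    rw [ih (i+1) _ (by omega) (fun k hk => hv k (by omega)) (by omega)]
    have hia : i < a.length := by omega
    rw [List.drop_eq_getElem_cons hia, List.drop_eq_getElem_cons hj, List.zip_cons_cons]
    rw [show ∀ p z, pvAddr (p :: z) = ((pvAddr z).1 + p.1 * (pvAddr z).2, (pvAddr z).2 * p.2) from fun p z => rfl]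
    rw [pvAddr_snd _ _ (by simp; omega)]
    rw [List.getD_eq_getElem a 0 hia]
    ring

theorem loopA_invalid (a rangeA : List Int) (i : Nat) (s : Int)
    (k : Nat) (hik : i ≤ k) (hka : k < a.length) (hkr : k < rangeA.length)
    (hbad : ¬(0 ≤ a.getD k 0 ∧ a.getD k 0 < rangeA.getD k 0)) :
    listToAddressLoopA a rangeA rangeA.length i s = -1 := by
  induction hn : rangeA.length - i generalizing i s with
  | zero => omega
  | succ n ih =>
    have hj : i < rangeA.length := by omega
    rw [listToAddressLoopA, dif_pos hj]
    by_cases hvi : a.getD i 0 < rangeA.getD i 0 ∧ 0 ≤ a.getD i 0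
    · rw [if_pos hvi]
      have hki : i ≠ k := by rintro rfl; exact hbad ⟨hvi.2, hvi.1⟩
      exact ih (i+1) _ (by omega) (by omega)
    · rw [if_neg hvi]

theorem alt_valid (a rangeA : List Int) (hN : rangeA.length ≤ a.length)
    (hv : ∀ p ∈ List.zip a rangeA, 0 ≤ p.1 ∧ p.1 < p.2) :
    listToAddress_alt a rangeA = (pvAddr (List.zip a rangeA)).1 := by
  unfold listToAddress_alt
  rw [if_neg (by
    simp only [List.any_eq_true, not_exists, not_and]
    intro p hp
    simp [(hv p hp).1, (hv p hp).2])]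
  rw [PySem.List.slice_to_natCast]
  rw [show List.zip (a.take rangeA.length).reverse rangeA.reverse
        = (List.zip (a.take rangeA.length) rangeA).reverse by
    simp only [List.zip_eq_zipWith]
    rw [List.reverse_zipWith (by simp; omega)]]
  rw [show List.zip (a.take rangeA.length) rangeA = List.zip a rangeA by
    rw [show List.zip (a.take rangeA.length) rangeA
          = List.zip (a.take rangeA.length) (rangeA.take rangeA.length) by simp]
    simp only [List.zip_eq_zipWith]
    rw [← List.take_zipWith]
    simp]
  rw [List.foldl_reverse]
  rfl

theorem alt_invalid (a rangeA : List Int)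
    (p : Int × Int) (hp : p ∈ List.zip a rangeA) (hbad : ¬(0 ≤ p.1 ∧ p.1 < p.2)) :
    listToAddress_alt a rangeA = -1 := by
  unfold listToAddress_alt
  rw [if_pos]
  simp only [List.any_eq_true]
  refine ⟨p, hp, ?_⟩
  by_cases h1 : (0:Int) ≤ p.1
  · have h2 : ¬ p.1 < p.2 := fun h2 => hbad ⟨h1, h2⟩
    simp [h1, h2]
  · simp [h1]

-- ===== VERDICT (by name: the statement is the Claim_ definition above) =====
theorem listToAddress_spec : Claim_equal_listToAddress := by
  intro a rangeA _ hpre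
  unfold Spec_listToAddress listToAddress
  by_cases hv : ∀ p ∈ List.zip a rangeA, 0 ≤ p.1 ∧ p.1 < p.2
  · have hN : rangeA.length ≤ a.length := by
      rcases hpre with h | ⟨p, hp, hbad⟩
      · exact h
      · exact absurd (hv p hp) hbad
    have hv' : ∀ k, 0 ≤ k → (hk : k < rangeA.length) →
        0 ≤ a.getD k 0 ∧ a.getD k 0 < rangeA.getD k 0 := by
      intro k _ hk
      have hka : k < a.length := by omega
      have hmem : (a[k], rangeA[k]) ∈ List.zip a rangeA := by
        rw [List.mem_iff_getElem]
        refine ⟨k, ?_, ?_⟩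
        · simp [List.length_zip]; omega
        · simp [List.getElem_zip]
      rw [List.getD_eq_getElem a 0 hka, List.getD_eq_getElem rangeA 0 hk]
      exact hv _ hmem
    rw [loopA_valid a rangeA 0 0 hN (by omega) hv']
    rw [alt_valid a rangeA hN hv]
    simp
  · push Not at hv
    obtain ⟨p, hp, hbad⟩ := hv
    have hbad' : ¬(0 ≤ p.1 ∧ p.1 < p.2) := fun h => absurd h.2 (not_lt.mpr (hbad h.1))
    obtain ⟨k, hk, hpk⟩ := List.mem_iff_getElem.mp hp
    have hkz : k < min a.length rangeA.length := by simpa using hk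
    rw [loopA_invalid a rangeA 0 0 k (by omega) (by omega) (by omega)
      (by
        rw [List.getD_eq_getElem a 0 (by omega), List.getD_eq_getElem rangeA 0 (by omega)]
        have h1 : a[k]'(by omega) = p.1 := by rw [← hpk]; simp [List.getElem_zip]
        have h2 : rangeA[k]'(by omega) = p.2 := by rw [← hpk]; simp [List.getElem_zip]
        rw [h1, h2]
        exact hbad')]
    rw [alt_invalid a rangeA p hp hbad']
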